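-- pv_equiv track=rewrite | github.com/alexbenari/neural-net-sandbox | tests/data_probes.py | _label_distribution
-- ===== SOURCE A (Python) =====
-- def _label_distribution(labels):
--     counts = {}
--     for label in labels:
--         counts[label] = counts.get(label, 0) + 1
--     items = sorted(counts.items())
--     x_labels = [str(item[0]) for item in items]
--     y_values = [item[1] for item in items]
--     return x_labels, y_values
-- ===== SOURCE B (Python) =====
-- from itertools import groupby
--
--
-- def _label_distribution(labels):
--     x_labels = []
--     y_values = []
--     for key, group in groupby(sorted(labels)):
--         x_labels.append(str(key))
--         y_values.append(sum(1 for _ in group))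
--     return x_labels, y_values
-- ===== Notes on version B (the rewrite author's own statement) =====
-- stated objective: idiomatic
-- what changed: Replaces the dict-based counting pass followed by sorting the (key, count) items with sorting the labels first and grouping consecutive equal runs via itertools.groupby.
import Mathlib
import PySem

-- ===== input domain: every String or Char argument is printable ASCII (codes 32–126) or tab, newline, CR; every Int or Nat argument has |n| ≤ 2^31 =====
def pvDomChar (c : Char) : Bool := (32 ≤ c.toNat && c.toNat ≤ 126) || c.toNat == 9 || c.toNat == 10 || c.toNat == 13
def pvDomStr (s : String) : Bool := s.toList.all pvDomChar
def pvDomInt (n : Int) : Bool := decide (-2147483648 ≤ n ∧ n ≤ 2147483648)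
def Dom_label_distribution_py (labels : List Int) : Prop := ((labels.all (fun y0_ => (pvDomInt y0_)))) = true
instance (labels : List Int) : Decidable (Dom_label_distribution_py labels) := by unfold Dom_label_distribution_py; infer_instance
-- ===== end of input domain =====

-- B replaces A's hash-count-then-sort with sort-then-group-consecutive-runs (itertools.groupby); same result, alternative algorithm.

-- ===== PORT A =====
def label_distribution_py (labels : List Int) : List String × List Int :=
  let counts := labels.foldl (fun d label => d.insert label (d.getD label 0 + 1)) PySem.Dict.empty
  let items := PySem.List.sorted2 counts.items Prod.fst Prod.snd
  let x_labels := items.map (fun item => PySem.Int.toStr item.1)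
  let y_values := items.map (fun item => item.2)
  (x_labels, y_values)

-- ===== PORT B =====
-- groupby(sorted(labels)): each run of equal consecutive values, with its key and length
def pvGroupRuns (l : List Int) : List (Int × Int) :=
  match l with
  | [] => []
  | x :: xs =>
      (x, 1 + ((xs.takeWhile (· == x)).length : Int)) :: pvGroupRuns (xs.dropWhile (· == x))
termination_by l.length
decreasing_by
  simpa using Nat.lt_succ_of_le (List.length_dropWhile_le (· == x) xs)

def label_distribution_py_alt (labels : List Int) : List String × List Int :=
  let runs := pvGroupRuns (PySem.List.sorted labels (fun x => x))
  (runs.map (fun r => PySem.Int.toStr r.1), runs.map (fun r => r.2))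

-- ===== PRECONDITION & SPEC =====
def Spec_label_distribution_py (labels : List Int) (out : List String × List Int) : Prop := out = label_distribution_py_alt labels
instance (labels : List Int) (out : List String × List Int) : Decidable (Spec_label_distribution_py labels out) := by unfold Spec_label_distribution_py; infer_instance

-- ===== CLAIM (what is proved, stated in full; the proofs are below) =====
def Claim_equal_label_distribution_py : Prop := ∀ (labels : List Int), Dom_label_distribution_py labels → Spec_label_distribution_py labels (label_distribution_py labels)

-- ===== LEMMAS AND PROOFS =====

-- insertBy respects pointwise-equal comparators (against the accumulator's members)
lemma insertBy_congr {α : Type} (b₁ b₂ : α → α → Bool) (x : α) (ys : List α)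
    (h : ∀ y ∈ ys, b₁ x y = b₂ x y) :
    PySem.List.insertBy b₁ x ys = PySem.List.insertBy b₂ x ys := by
  induction ys with
  | nil => rfl
  | cons y t ih =>
      simp only [PySem.List.insertBy]
      rw [h y (by simp)]
      split
      · rfl
      · rw [ih (fun z hz => h z (by simp [hz]))]

lemma foldl_insertBy_congr {α : Type} (b₁ b₂ : α → α → Bool) :
    ∀ (xs acc : List α),
    (∀ a b : α, (a ∈ xs ∨ a ∈ acc) → (b ∈ xs ∨ b ∈ acc) → b₁ a b = b₂ a b) →
    xs.foldl (fun acc x => PySem.List.insertBy b₁ x acc) acc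
      = xs.foldl (fun acc x => PySem.List.insertBy b₂ x acc) acc := by
  intro xs
  induction xs with
  | nil => intro acc _; rfl
  | cons x t ih =>
      intro acc h
      simp only [List.foldl_cons]
      rw [insertBy_congr b₁ b₂ x acc (fun y hy => h x y (Or.inl (by simp)) (Or.inr hy))]
      apply ih
      intro a b ha hb
      apply h a b
      · rcases ha with ha | ha
        · exact Or.inl (by simp [ha])
        · rcases (PySem.List.mem_insertBy _ _ _ _).1 ha with rfl | ha
          · exact Or.inl (by simp)
          · exact Or.inr ha
      · rcases hb with hb | hb
        · exact Or.inl (by simp [hb])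
        · rcases (PySem.List.mem_insertBy _ _ _ _).1 hb with rfl | hb
          · exact Or.inl (by simp)
          · exact Or.inr hb

-- Python's lexicographic tuple sort coincides with sort-by-first-component when
-- equal first components force equal pairs
lemma sorted2_eq_sorted_fst (xs : List (Int × Int))
    (h : ∀ a ∈ xs, ∀ b ∈ xs, a.1 = b.1 → a = b) :
    PySem.List.sorted2 xs Prod.fst Prod.snd = PySem.List.sorted xs Prod.fst := by
  rw [PySem.List.sorted_eq_foldl_insertBy]
  show xs.foldl (fun acc p => PySem.List.insertBy
      (fun a b => decide (a.1 < b.1) || (!decide (b.1 < a.1) && decide (a.2 < b.2))) p acc) []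
    = xs.foldl (fun acc p => PySem.List.insertBy (fun a b => decide (a.1 < b.1)) p acc) []
  apply foldl_insertBy_congr
  intro a b ha hb
  simp only [List.not_mem_nil, or_false] at ha hb
  rcases eq_or_ne a.1 b.1 with heq | hne
  · have hab : a = b := h a ha b hb heq
    subst hab
    simp
  · rcases lt_or_gt_of_ne hne with hlt | hgt
    · simp [hlt]
    · have h1 : ¬ a.1 < b.1 := asymm hgt
      simp [h1, hgt]

-- every key produced by pvGroupRuns is a member of the list
lemma mem_fst_pvGroupRuns : ∀ (l : List Int) (p : Int × Int), p ∈ pvGroupRuns l → p.1 ∈ l := by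
  intro l
  induction l using pvGroupRuns.induct with
  | case1 => intro p hp; simp [pvGroupRuns] at hp
  | case2 x xs ih =>
      intro p hp
      rw [pvGroupRuns] at hp
      rcases List.mem_cons.1 hp with hp | hp
      · simp [hp]
      · exact List.mem_cons.2 (Or.inr ((List.dropWhile_sublist (· == x)).mem (ih p hp)))

-- in a ≤-sorted list x :: xs, the dropWhile(== x) part contains no x
lemma not_mem_dropWhile_sorted (x : Int) (xs : List Int)
    (hs : (x :: xs).Pairwise (· ≤ ·)) : x ∉ xs.dropWhile (· == x) := by
  intro hx
  cases hd : xs.dropWhile (· == x) with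
  | nil => simp [hd] at hx
  | cons y t =>
      have hy : (y == x) = false := by
        have := List.head?_dropWhile_not (· == x) xs
        rw [hd] at this; simpa using this
      have hyx : y ≠ x := by simpa using hy
      rw [hd] at hx
      have hsub : (y :: t).Sublist xs := hd ▸ List.dropWhile_sublist (· == x)
      have hxy : x ≤ y := (List.pairwise_cons.1 hs).1 y (hsub.mem (by simp))
      have hpd : (y :: t).Pairwise (· ≤ ·) :=
        ((List.pairwise_cons.1 hs).2).sublist hsub
      rcases List.mem_cons.1 hx with h1 | h2
      · exact hyx h1.symm
      · exact hyx (le_antisymm ((List.pairwise_cons.1 hpd).1 x h2) hxy)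

-- counts computed by pvGroupRuns on a sorted list are the list's counts
lemma pvGroupRuns_count : ∀ (l : List Int), l.Pairwise (· ≤ ·) →
    ∀ p ∈ pvGroupRuns l, p.2 = (l.count p.1 : Int) := by
  intro l
  induction l using pvGroupRuns.induct with
  | case1 => intro _ p hp; simp [pvGroupRuns] at hp
  | case2 x xs ih =>
      intro hs p hp
      have hsplit : xs.takeWhile (· == x) ++ xs.dropWhile (· == x) = xs :=
        List.takeWhile_append_dropWhile
      have htake : ∀ b ∈ xs.takeWhile (· == x), x = b := by
        intro b hb
        have h := List.mem_takeWhile_imp hb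
        exact (eq_of_beq h).symm
      have hxd : x ∉ xs.dropWhile (· == x) := not_mem_dropWhile_sorted x xs hs
      have hpd : (xs.dropWhile (· == x)).Pairwise (· ≤ ·) :=
        ((List.pairwise_cons.1 hs).2).sublist (List.dropWhile_sublist (· == x))
      rw [pvGroupRuns] at hp
      rcases List.mem_cons.1 hp with hp | hp
      · subst hp
        have hcx : xs.count x = (xs.takeWhile (· == x)).length := by
          conv_lhs => rw [← hsplit]
          rw [List.count_append, List.count_eq_length.2 htake,
              List.count_eq_zero.2 hxd]
          omega
        rw [List.count_cons_self, hcx]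
        push_cast
        ring
      · have h1 : p.1 ∈ xs.dropWhile (· == x) := mem_fst_pvGroupRuns _ p hp
        have hne : p.1 ≠ x := fun e => hxd (e ▸ h1)
        have hnt : p.1 ∉ xs.takeWhile (· == x) := fun ht => hne (htake _ ht).symm
        rw [ih hpd p hp]
        have hcc : (x :: xs).count p.1 = (xs.dropWhile (· == x)).count p.1 := by
          rw [List.count_cons_of_ne hne.symm]
          conv_lhs => rw [← hsplit]
          rw [List.count_append, List.count_eq_zero.2 hnt]
          omega
        rw [hcc]

-- keys of pvGroupRuns on a sorted list are strictly increasing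
lemma pvGroupRuns_keys_lt : ∀ (l : List Int), l.Pairwise (· ≤ ·) →
    ((pvGroupRuns l).map Prod.fst).Pairwise (· < ·) := by
  intro l
  induction l using pvGroupRuns.induct with
  | case1 => intro _; simp [pvGroupRuns]
  | case2 x xs ih =>
      intro hs
      have hxd : x ∉ xs.dropWhile (· == x) := not_mem_dropWhile_sorted x xs hs
      have hpd : (xs.dropWhile (· == x)).Pairwise (· ≤ ·) :=
        ((List.pairwise_cons.1 hs).2).sublist (List.dropWhile_sublist (· == x))
      rw [pvGroupRuns]
      simp only [List.map_cons]
      rw [List.pairwise_cons]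
      refine ⟨?_, ih hpd⟩
      intro k hk
      rcases List.mem_map.1 hk with ⟨p, hp, rfl⟩
      have hmem : p.1 ∈ xs.dropWhile (· == x) := mem_fst_pvGroupRuns _ p hp
      have hle : x ≤ p.1 :=
        (List.pairwise_cons.1 hs).1 p.1 ((List.dropWhile_sublist (· == x)).mem hmem)
      exact lt_of_le_of_ne hle (fun e => hxd (e ▸ hmem))

-- the keys of pvGroupRuns are exactly the list's members
lemma mem_pvGroupRuns_keys : ∀ (l : List Int) (k : Int),
    (k ∈ (pvGroupRuns l).map Prod.fst ↔ k ∈ l) := by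
  intro l
  induction l using pvGroupRuns.induct with
  | case1 => intro k; simp [pvGroupRuns]
  | case2 x xs ih =>
      intro k
      have hsplit : xs.takeWhile (· == x) ++ xs.dropWhile (· == x) = xs :=
        List.takeWhile_append_dropWhile
      constructor
      · intro hk
        rcases List.mem_map.1 hk with ⟨p, hp, rfl⟩
        exact mem_fst_pvGroupRuns _ p hp
      · intro hk
        rw [pvGroupRuns]
        simp only [List.map_cons, List.mem_cons]
        rcases List.mem_cons.1 hk with rfl | hk
        · exact Or.inl rfl
        · rw [← hsplit] at hk
          rcases List.mem_append.1 hk with hk | hk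
          · have := List.mem_takeWhile_imp hk
            simp at this
            exact Or.inl this
          · exact Or.inr ((ih k).2 hk)

-- the canonical form both ports reach: sorted distinct keys paired with their counts
lemma pvGroupRuns_sorted_eq (labels : List Int) :
    pvGroupRuns (PySem.List.sorted labels (fun x => x))
      = (PySem.List.sorted (PySem.Set.ofList labels) (fun x => x)).map
          (fun k => (k, (labels.count k : Int))) := by
  set s := PySem.List.sorted labels (fun x => x) with hsdef
  have hperm : s.Perm labels := PySem.List.sorted_perm labels (fun x => x) false
  have hs : s.Pairwise (· ≤ ·) := PySem.List.sorted_pairwise labels (fun x => x)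
  have hkeys : PySem.List.sorted (PySem.Set.ofList labels) (fun x => x)
      = (pvGroupRuns s).map Prod.fst := by
    apply PySem.List.sorted_eq_of_perm_of_pairwise_lt
    · apply (List.perm_ext_iff_of_nodup ?_ ?_).2
      · intro k
        rw [mem_pvGroupRuns_keys s k, PySem.Set.mem_ofList, hsdef,
            PySem.List.mem_sorted]
      · exact (pvGroupRuns_keys_lt s hs).imp ne_of_lt
      · exact PySem.Set.nodup_ofList labels
    · exact pvGroupRuns_keys_lt s hs
  rw [hkeys, List.map_map]
  symm
  have hmap : ∀ p ∈ pvGroupRuns s,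
      ((fun k => (k, (labels.count k : Int))) ∘ Prod.fst) p = id p := by
    intro p hp
    have hc : p.2 = (s.count p.1 : Int) := pvGroupRuns_count s hs p hp
    rw [hperm.count_eq p.1] at hc
    simpa [Function.comp] using (Prod.ext rfl hc.symm : (p.1, (labels.count p.1 : Int)) = p)
  rw [List.map_congr_left hmap, List.map_id]

lemma items_sorted_eq (labels : List Int) :
    PySem.List.sorted2 (PySem.Dict.counter labels).items Prod.fst Prod.snd
      = (PySem.List.sorted (PySem.Set.ofList labels) (fun x => x)).map
          (fun k => (k, (labels.count k : Int))) := by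
  rw [PySem.Dict.items_counter]
  rw [sorted2_eq_sorted_fst]
  · apply PySem.List.sorted_eq_of_perm_of_pairwise_lt
    · exact ((PySem.List.sorted_perm (PySem.Set.ofList labels) (fun x => x) false).map _)
    · have := PySem.List.sorted_ofList_pairwise_lt labels
      exact List.Pairwise.map _ (by intro a b h; simpa using h) this
  · intro a ha b hb hab
    rcases List.mem_map.1 ha with ⟨k, _, rfl⟩
    rcases List.mem_map.1 hb with ⟨k', _, rfl⟩
    dsimp only at hab
    rw [hab]

-- ===== VERDICT (by name: the statement is the Claim_ definition above) =====
theorem label_distribution_py_spec : Claim_equal_label_distribution_py := by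
  intro labels _
  unfold Spec_label_distribution_py label_distribution_py label_distribution_py_alt
  simp only [PySem.Dict.foldl_insert_getD_add_one_eq_counter]
  rw [items_sorted_eq, pvGroupRuns_sorted_eq]
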